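-- pv_equiv track=rewrite | github.com/waroonX/python_realm | testCodes/picking_numbers.py | pickingNumbers_opt
-- ===== SOURCE A (Python) =====
-- from collections import defaultdict
--
-- def pickingNumbers_opt(a):
--     mem = defaultdict(int)
--     for num in a:
--         mem[num] += 1
--     length = 0
--     for num, count in mem.items():
--         length = max(length, count+mem.get(num+1, 0))
--
--     return length
-- ===== SOURCE B (Python) =====
-- def pickingNumbers_opt(a):
--     s = sorted(a)
--     n = len(s)
--     best = 0
--     i = 0
--     while i < n:
--         j = i
--         while j < n and s[j] == s[i]:
--             j += 1
--         k = j
--         while k < n and s[k] == s[i] + 1: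
--             k += 1
--         if k - i > best:
--             best = k - i
--         i = j
--     return best
-- ===== Notes on version B (the rewrite author's own statement) =====
-- stated objective: alternative
-- what changed: B replaces A's counting dictionary and items scan by sorting the list and walking it run by run, taking for each run of a value v the length of that run plus the immediately following run of v+1 as the candidate maximum.
import Mathlib
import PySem

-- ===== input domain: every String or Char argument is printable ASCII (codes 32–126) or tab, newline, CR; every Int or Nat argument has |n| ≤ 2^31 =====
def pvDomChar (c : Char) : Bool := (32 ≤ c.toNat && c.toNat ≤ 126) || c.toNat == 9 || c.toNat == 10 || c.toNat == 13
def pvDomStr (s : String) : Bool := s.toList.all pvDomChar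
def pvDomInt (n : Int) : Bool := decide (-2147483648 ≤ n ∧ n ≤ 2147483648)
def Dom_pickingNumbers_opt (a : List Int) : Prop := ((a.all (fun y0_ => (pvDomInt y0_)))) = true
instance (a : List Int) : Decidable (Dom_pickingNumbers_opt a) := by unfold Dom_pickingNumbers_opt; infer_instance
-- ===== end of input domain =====

-- B replaces A's counting dictionary by sort-then-scan over runs of equal values (alternative algorithm, same results).

-- ===== PORT A =====
-- mem = defaultdict(int); for num in a: mem[num] += 1; then scan mem.items() keeping the running max of count + mem.get(num+1, 0)
def pickingNumbers_opt (a : List Int) : Int :=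
  let mem : PySem.Dict Int Int := a.foldl (fun d num => d.modify num 0 (· + 1)) PySem.Dict.empty
  mem.items.foldl (fun length p => max length (p.2 + mem.getD (p.1 + 1) 0)) 0

-- ===== PORT B =====
-- the outer 'while i < n' walks run boundaries of the sorted list (recursion on the current suffix);
-- the two inner whiles are the takeWhile scans counting s[i]'s run (j - i) and the following run of s[i]+1 (k - j)
def pvRunsGo : List Int → Int → Int
  | [], best => best
  | x :: xs, best =>
    let rest := (x :: xs).dropWhile (fun y => y == x)
    let c1 := ((x :: xs).takeWhile (fun y => y == x)).length
    let c2 := (rest.takeWhile (fun y => y == x + 1)).length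
    pvRunsGo rest (if ((c1 : Int) + (c2 : Int)) > best then ((c1 : Int) + (c2 : Int)) else best)
termination_by s _ => s.length
decreasing_by
  simp only [List.dropWhile_cons, beq_self_eq_true, if_true]
  exact Nat.lt_succ_of_le (List.length_dropWhile_le _ _)

def pickingNumbers_opt_alt (a : List Int) : Int :=
  pvRunsGo (PySem.List.sorted a (fun v => v) false) 0

-- ===== PRECONDITION & SPEC =====
def Spec_pickingNumbers_opt (a : List Int) (out : Int) : Prop := out = pickingNumbers_opt_alt a
instance (a : List Int) (out : Int) : Decidable (Spec_pickingNumbers_opt a out) := by unfold Spec_pickingNumbers_opt; infer_instance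

-- ===== CLAIM (what is proved, stated in full; the proofs are below) =====
def Claim_equal_pickingNumbers_opt : Prop := ∀ (a : List Int), Dom_pickingNumbers_opt a → Spec_pickingNumbers_opt a (pickingNumbers_opt a)

-- ===== LEMMAS AND PROOFS =====

-- A's result is the running max, over the distinct values of a, of count v + count (v+1)
lemma pv_A_eq (a : List Int) :
    pickingNumbers_opt a =
      ((PySem.Set.ofList a).map
        (fun v => ((a.count v : Int) + (a.count (v + 1) : Int)))).foldl max 0 := by
  unfold pickingNumbers_opt
  rw [← PySem.Dict.counter_eq_foldl]
  simp [PySem.Dict.items_counter, List.foldl_map, PySem.Dict.getD_counter]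

-- in a sorted list whose elements are all ≥ y, the y's form the leading run
lemma pv_count_front (t : List Int) (y : Int) (ht : t.Pairwise (· ≤ ·)) (h : ∀ z ∈ t, y ≤ z) :
    t.count y = (t.takeWhile (fun z => z == y)).length := by
  induction t with
  | nil => simp
  | cons z t ih =>
    rcases List.pairwise_cons.mp ht with ⟨hz, ht'⟩
    by_cases hzy : z = y
    · subst hzy
      simp only [List.takeWhile_cons, beq_self_eq_true, if_true, List.count_cons,
        beq_self_eq_true, List.length_cons]
      have := ih ht' (fun w hw => hz w hw)
      omega
    · have hlt : y < z := lt_of_le_of_ne (h z (by simp)) (Ne.symm hzy)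
      have h0 : t.count y = 0 := List.count_eq_zero.mpr (fun hy => absurd (hz y hy) (by omega))
      simp [hzy, h0]

-- B's scan equals the fold of max over the distinct values (some nodup enumeration D of them)
lemma pv_runsGo_spec : ∀ (n : Nat) (s : List Int), s.length ≤ n → s.Pairwise (· ≤ ·) →
    ∃ D : List Int, D.Nodup ∧ (∀ v : Int, v ∈ D ↔ v ∈ s) ∧
      ∀ best : Int, pvRunsGo s best =
        (D.map (fun v => ((s.count v : Int) + (s.count (v + 1) : Int)))).foldl max best := by
  intro n
  induction n with
  | zero =>
    intro s hlen _
    have : s = [] := List.eq_nil_of_length_eq_zero (Nat.le_zero.mp hlen)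
    subst this
    exact ⟨[], by simp, by simp, fun best => by simp [pvRunsGo]⟩
  | succ n ih =>
    intro s hlen hs
    match s with
    | [] => exact ⟨[], by simp, by simp, fun best => by simp [pvRunsGo]⟩
    | x :: xs =>
      have hxle : ∀ z ∈ x :: xs, x ≤ z := by
        intro z hz
        rcases List.mem_cons.mp hz with h | h
        · omega
        · exact (List.pairwise_cons.mp hs).1 z h
      have hsub : ((x :: xs).dropWhile (fun y => y == x)).Sublist (x :: xs) :=
        List.dropWhile_sublist _
      have hrest_sorted : ((x :: xs).dropWhile (fun y => y == x)).Pairwise (· ≤ ·) :=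
        List.Pairwise.sublist hsub hs
      have hgt : ∀ z ∈ (x :: xs).dropWhile (fun y => y == x), x < z := by
        cases hr : (x :: xs).dropWhile (fun y => y == x) with
        | nil => simp
        | cons r rs =>
          have hpr : (r == x) = false := by
            have := List.head?_dropWhile_not (fun y => y == x) (x :: xs)
            rw [hr] at this
            simpa using this
          have hrx : x < r := by
            have hmemr : r ∈ x :: xs := hsub.mem (by rw [hr]; exact List.mem_cons_self ..)
            have := hxle r hmemr
            have : r ≠ x := by simpa using hpr
            omega
          intro z hz
          rcases List.mem_cons.mp hz with h | h
          · omega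
          · have := (List.pairwise_cons.mp (hr ▸ hrest_sorted)).1 z h
            omega
      have hxnot : x ∉ (x :: xs).dropWhile (fun y => y == x) := by
        intro h
        exact absurd (hgt x h) (lt_irrefl x)
      have hsplit : ((x :: xs).takeWhile (fun y => y == x)) ++
          ((x :: xs).dropWhile (fun y => y == x)) = x :: xs :=
        List.takeWhile_append_dropWhile
      have htake_eq : ∀ v ∈ (x :: xs).takeWhile (fun y => y == x), v = x := by
        intro v hv
        simpa using List.mem_takeWhile_imp hv
      have hmemiff : ∀ v : Int, v ∈ x :: xs ↔ v = x ∨ v ∈ (x :: xs).dropWhile (fun y => y == x) := by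
        intro v
        constructor
        · intro hv
          rcases List.mem_append.mp (by rw [hsplit]; exact hv) with h | h
          · exact Or.inl (htake_eq v h)
          · exact Or.inr h
        · rintro (rfl | h)
          · exact List.mem_cons_self ..
          · exact hsub.mem h
      -- count transfer: values different from x have the same count in the suffix
      have hcnt : ∀ v : Int, v ≠ x →
          (x :: xs).count v = ((x :: xs).dropWhile (fun y => y == x)).count v := by
        intro v hv
        have h0 : ((x :: xs).takeWhile (fun y => y == x)).count v = 0 :=
          List.count_eq_zero.mpr (fun hm => hv (htake_eq v hm))
        calc (x :: xs).count v
            = (((x :: xs).takeWhile (fun y => y == x)) ++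
                ((x :: xs).dropWhile (fun y => y == x))).count v := by rw [hsplit]
          _ = _ := by rw [List.count_append, h0]; omega
      -- the two run lengths of the port are the two counts
      have hc1 : (x :: xs).count x = ((x :: xs).takeWhile (fun y => y == x)).length :=
        pv_count_front _ x hs hxle
      have hc2 : (x :: xs).count (x + 1) =
          (((x :: xs).dropWhile (fun y => y == x)).takeWhile (fun y => y == x + 1)).length := by
        have hge : ∀ z ∈ (x :: xs).dropWhile (fun y => y == x), x + 1 ≤ z :=
          fun z hz => by have := hgt z hz; omega
        have h0 : ((x :: xs).takeWhile (fun y => y == x)).count (x + 1) = 0 :=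
          List.count_eq_zero.mpr (fun hm => by have := htake_eq _ hm; omega)
        calc (x :: xs).count (x + 1)
            = (((x :: xs).takeWhile (fun y => y == x)) ++
                ((x :: xs).dropWhile (fun y => y == x))).count (x + 1) := by rw [hsplit]
          _ = ((x :: xs).dropWhile (fun y => y == x)).count (x + 1) := by
              rw [List.count_append, h0]; omega
          _ = _ := pv_count_front _ (x + 1) hrest_sorted hge
      have hlen' : ((x :: xs).dropWhile (fun y => y == x)).length ≤ n := by
        have : (x :: xs).dropWhile (fun y => y == x) = xs.dropWhile (fun y => y == x) := by
          simp
        rw [this]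
        have := List.length_dropWhile_le (fun y => y == x) xs
        simpa using Nat.le_trans this (Nat.le_of_succ_le_succ hlen)
      obtain ⟨D', hnd', hmem', heq'⟩ := ih _ hlen' hrest_sorted
      refine ⟨x :: D', ?_, ?_, ?_⟩
      · exact List.nodup_cons.mpr ⟨fun h => hxnot ((hmem' x).mp h), hnd'⟩
      · intro v
        rw [hmemiff v, List.mem_cons, hmem' v]
      · intro best
        rw [pvRunsGo, heq']
        have hmapeq :
            D'.map (fun v => ((((x :: xs).dropWhile (fun y => y == x)).count v : Int) +
                (((x :: xs).dropWhile (fun y => y == x)).count (v + 1) : Int))) =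
            D'.map (fun v => (((x :: xs).count v : Int) + ((x :: xs).count (v + 1) : Int))) := by
          apply List.map_congr_left
          intro v hv
          have hvr := (hmem' v).mp hv
          have hvx : x < v := hgt v hvr
          rw [hcnt v (by omega), hcnt (v + 1) (by omega)]
        rw [hmapeq, List.map_cons, List.foldl_cons]
        congr 1
        rw [hc1, hc2]
        omega

-- folding max over permuted lists agrees
lemma pv_foldl_max_perm (l₁ l₂ : List Int) (h : l₁.Perm l₂) (b : Int) :
    l₁.foldl max b = l₂.foldl max b := h.foldl_eq b

theorem pv_main (a : List Int) : pickingNumbers_opt a = pickingNumbers_opt_alt a := by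
  have hperm : (PySem.List.sorted a (fun v => v) false).Perm a :=
    PySem.List.sorted_perm a (fun v => v) false
  have hs : (PySem.List.sorted a (fun v => v) false).Pairwise (· ≤ ·) := by
    simpa using PySem.List.sorted_pairwise a (fun v => v)
  obtain ⟨D, hnd, hmemD, heq⟩ :=
    pv_runsGo_spec (PySem.List.sorted a (fun v => v) false).length _ le_rfl hs
  have hcounts : ∀ v : Int, (PySem.List.sorted a (fun v => v) false).count v = a.count v :=
    fun v => hperm.count_eq v
  have hB : pickingNumbers_opt_alt a =
      (D.map (fun v => ((a.count v : Int) + (a.count (v + 1) : Int)))).foldl max 0 := by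
    unfold pickingNumbers_opt_alt
    rw [heq 0]
    congr 1
    exact List.map_congr_left (fun v _ => by rw [hcounts v, hcounts (v + 1)])
  have hp : (PySem.Set.ofList a).Perm D := by
    rw [List.perm_ext_iff_of_nodup (PySem.Set.nodup_ofList a) hnd]
    intro v
    rw [PySem.Set.mem_ofList, hmemD v, hperm.mem_iff]
  rw [pv_A_eq, hB]
  exact pv_foldl_max_perm _ _ (hp.map _) 0

-- ===== VERDICT (by name: the statement is the Claim_ definition above) =====
theorem pickingNumbers_opt_spec : Claim_equal_pickingNumbers_opt := by
  intro a _hd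
  unfold Spec_pickingNumbers_opt
  exact pv_main a
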